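-- pv_equiv track=rewrite | github.com/im-henri/CP_3D_render | TextureMaker.py | init_table1
-- ===== SOURCE A (Python) =====
-- def init_table1(size, initUpper=True, initLower=True):
--     table = [[0 for i in range(size)] for j in range(size)]
--     y = 0
--     if initLower:
--         for circle in range(size):
--             for x in range(circle+1):
--                 table[y][x] = y
--             y += 1
--     if initUpper:
--         x = 0
--         for circle in range(size):
--             for y in range(circle+1):
--                 table[y][x] = x
--             x += 1
--     return table
-- ===== SOURCE B (Python) =====
-- def init_table1(size, initUpper=True, initLower=True):
--     return [[(j if initUpper and i <= j else i if initLower and j <= i else 0)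
--              for j in range(size)]
--             for i in range(size)]
-- ===== Notes on version B (the rewrite author's own statement) =====
-- stated objective: simpler
-- what changed: Replaces the zero-fill plus two sequential triangular in-place passes (lower triangle then upper triangle with running counters) by a single nested comprehension computing each cell directly from its coordinates by a closed-form conditional.
import Mathlib
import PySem

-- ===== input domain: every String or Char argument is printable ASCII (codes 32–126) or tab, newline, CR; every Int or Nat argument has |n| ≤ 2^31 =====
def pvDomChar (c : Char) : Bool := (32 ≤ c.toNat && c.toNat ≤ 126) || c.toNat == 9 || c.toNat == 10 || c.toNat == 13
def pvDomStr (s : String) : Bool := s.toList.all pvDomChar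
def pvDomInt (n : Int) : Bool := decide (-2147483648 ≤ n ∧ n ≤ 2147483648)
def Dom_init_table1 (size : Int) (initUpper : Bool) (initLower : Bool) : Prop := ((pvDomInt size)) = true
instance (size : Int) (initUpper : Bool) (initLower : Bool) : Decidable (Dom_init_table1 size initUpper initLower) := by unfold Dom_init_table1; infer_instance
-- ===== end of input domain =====

-- B replaces A's zero-fill plus two triangular in-place passes by one nested
-- comprehension computing each cell by a closed-form conditional (objective: simpler).

-- ===== PORT A =====
-- `table[y][x] = v` for the nonnegative in-range indices A's loops produce:
-- exact as List.set on the row fetched by getD (indices are always in bounds here).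
def pvSetCell (t : List (List Int)) (y x v : Int) : List (List Int) :=
  t.set y.toNat ((t.getD y.toNat []).set x.toNat v)

def init_table1 (size : Int) (initUpper : Bool) (initLower : Bool) : List (List Int) :=
  let table : List (List Int) :=
    (PySem.List.pyRange 0 size 1).map (fun _ => (PySem.List.pyRange 0 size 1).map (fun _ => (0 : Int)))
  let st1 : List (List Int) × Int :=
    if initLower then
      (PySem.List.pyRange 0 size 1).foldl
        (fun (st : List (List Int) × Int) circle =>
          ((PySem.List.pyRange 0 (circle + 1) 1).foldl
              (fun t x => pvSetCell t st.2 x st.2) st.1,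
           st.2 + 1))
        (table, 0)
    else (table, 0)
  let table := st1.1
  if initUpper then
    ((PySem.List.pyRange 0 size 1).foldl
        (fun (st : List (List Int) × Int) circle =>
          ((PySem.List.pyRange 0 (circle + 1) 1).foldl
              (fun t y => pvSetCell t y st.2 st.2) st.1,
           st.2 + 1))
        (table, 0)).1
  else table

-- ===== PORT B =====
def init_table1_alt (size : Int) (initUpper : Bool) (initLower : Bool) : List (List Int) :=
  (PySem.List.pyRange 0 size 1).map (fun i =>
    (PySem.List.pyRange 0 size 1).map (fun j =>
      if initUpper && decide (i ≤ j) then j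
      else if initLower && decide (j ≤ i) then i
      else 0))

-- ===== PRECONDITION & SPEC =====
def Spec_init_table1 (size : Int) (initUpper : Bool) (initLower : Bool) (out : List (List Int)) : Prop := out = init_table1_alt size initUpper initLower
instance (size : Int) (initUpper : Bool) (initLower : Bool) (out : List (List Int)) : Decidable (Spec_init_table1 size initUpper initLower out) := by unfold Spec_init_table1; infer_instance

-- ===== CLAIM (what is proved, stated in full; the proofs are below) =====
def Claim_equal_init_table1 : Prop := ∀ (size : Int) (initUpper : Bool) (initLower : Bool), Dom_init_table1 size initUpper initLower → Spec_init_table1 size initUpper initLower (init_table1 size initUpper initLower)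

-- ===== LEMMAS AND PROOFS =====

-- Nat-indexed cell update and read, used to characterise A's in-place passes.
def pvSetN (t : List (List Int)) (y x : ℕ) (v : Int) : List (List Int) :=
  t.set y ((t.getD y []).set x v)

def pvCell (t : List (List Int)) (y x : ℕ) : Int :=
  (t.getD y []).getD x 0

theorem pvSetCell_natCast (t : List (List Int)) (y x : ℕ) (v : Int) :
    pvSetCell t (↑y) (↑x) v = pvSetN t y x v := by
  simp [pvSetCell, pvSetN]

theorem length_pvSetN (t : List (List Int)) (y x : ℕ) (v : Int) :
    (pvSetN t y x v).length = t.length := by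
  simp [pvSetN]

theorem rowlen_pvSetN (t : List (List Int)) (y x : ℕ) (v : Int) (y' : ℕ) :
    ((pvSetN t y x v).getD y' []).length = (t.getD y' []).length := by
  unfold pvSetN
  by_cases hy : y < t.length
  · by_cases h : y' = y
    · subst h
      simp only [List.getD_eq_getElem?_getD, List.getElem?_set_self (by simpa using hy)]
      simp
    · simp only [List.getD_eq_getElem?_getD,
        List.getElem?_set_ne (show y ≠ y' by omega)]
  · rw [List.set_eq_of_length_le (by omega)]

theorem pvCell_pvSetN (t : List (List Int)) (y x : ℕ) (v : Int) (y' x' : ℕ) :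
    pvCell (pvSetN t y x v) y' x' =
      if y' = y ∧ x' = x ∧ y < t.length ∧ x < (t.getD y []).length then v
      else pvCell t y' x' := by
  unfold pvCell pvSetN
  simp only [List.getD_eq_getElem?_getD, List.getElem?_set]
  by_cases hyy : y = y'
  · subst hyy
    by_cases hy : y < t.length
    · simp only [hy, if_true, List.getElem?_eq_getElem hy, Option.getD_some]
      by_cases hxx : x = x'
      · subst hxx
        by_cases hx : x < t[y].length <;>
          simp [hx, List.getElem?_eq_getElem hy, List.getElem?_set]
      · simp [List.getElem?_eq_getElem hy, hxx,
          show x' ≠ x from fun h => hxx h.symm, List.getElem?_set]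
    · simp [hy]
  · simp [show y' ≠ y from fun h => hyy h.symm, hyy]

-- shape preservation through any fold of shape-preserving steps
theorem foldl_shape {σ : Type} (f : List (List Int) → σ → List (List Int))
    (hf : ∀ t s, (f t s).length = t.length ∧
      ∀ y, ((f t s).getD y []).length = (t.getD y []).length) :
    ∀ (l : List σ) (t : List (List Int)),
      (l.foldl f t).length = t.length ∧
      ∀ y, ((l.foldl f t).getD y []).length = (t.getD y []).length := by
  intro l
  induction l with
  | nil => intro t; exact ⟨rfl, fun _ => rfl⟩
  | cons s l ih =>
    intro t
    obtain ⟨h1, h2⟩ := ih (f t s)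
    exact ⟨h1.trans (hf t s).1, fun y => (h2 y).trans ((hf t s).2 y)⟩

-- inner fold of the lower pass: fill prefix of row r with value v
theorem pvRowFill (r : ℕ) (v : Int) (m : ℕ) :
    ∀ (t : List (List Int)) (y x : ℕ),
      pvCell ((List.range m).foldl (fun t x => pvSetN t r x v) t) y x =
        if y = r ∧ x < m ∧ r < t.length ∧ x < (t.getD r []).length then v
        else pvCell t y x := by
  induction m with
  | zero => intro t y x; simp
  | succ m ih =>
    intro t y x
    rw [List.range_succ, List.foldl_append, List.foldl_cons, List.foldl_nil]
    obtain ⟨hl, hr⟩ := foldl_shape (fun t x => pvSetN t r x v)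
      (fun t s => ⟨length_pvSetN .., fun y => rowlen_pvSetN ..⟩) (List.range m) t
    rw [pvCell_pvSetN, hl, hr, ih]
    by_cases hy : y = r <;> by_cases hx : x = m <;>
      simp [hy, hx] <;> omega

-- inner fold of the upper pass: fill prefix of column c with value v
theorem pvColFill (c : ℕ) (v : Int) (m : ℕ) :
    ∀ (t : List (List Int)) (y x : ℕ),
      pvCell ((List.range m).foldl (fun t y => pvSetN t y c v) t) y x =
        if x = c ∧ y < m ∧ y < t.length ∧ c < (t.getD y []).length then v
        else pvCell t y x := by
  induction m with
  | zero => intro t y x; simp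
  | succ m ih =>
    intro t y x
    rw [List.range_succ, List.foldl_append, List.foldl_cons, List.foldl_nil]
    obtain ⟨hl, hr⟩ := foldl_shape (fun t y => pvSetN t y c v)
      (fun t s => ⟨length_pvSetN .., fun y => rowlen_pvSetN ..⟩) (List.range m) t
    rw [pvCell_pvSetN, hl, hr, ih]
    by_cases hx : x = c <;> by_cases hy : y = m <;>
      simp [hx, hy] <;> omega

-- rectangular shape
def pvShape (n : ℕ) (t : List (List Int)) : Prop :=
  t.length = n ∧ ∀ y : ℕ, y < n → (t.getD y []).length = n

theorem foldl_shape_pvShape {σ : Type} (f : List (List Int) → σ → List (List Int))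
    (hf : ∀ t s, (f t s).length = t.length ∧
      ∀ y, ((f t s).getD y []).length = (t.getD y []).length)
    (l : List σ) (t : List (List Int)) (n : ℕ) (h : pvShape n t) :
    pvShape n (l.foldl f t) := by
  obtain ⟨h1, h2⟩ := foldl_shape f hf l t
  exact ⟨h1.trans h.1, fun y hy => (h2 y).trans (h.2 y hy)⟩

-- the lower pass on a rectangular table
theorem pvLowerPass (n : ℕ) :
    ∀ (m : ℕ) (t : List (List Int)), pvShape n t →
      ∀ y x : ℕ,
        pvCell ((List.range m).foldl
            (fun t c => (List.range (c + 1)).foldl (fun t x => pvSetN t c x (c : Int)) t) t) y x =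
          if y < m ∧ x ≤ y ∧ y < n ∧ x < n then (y : Int) else pvCell t y x := by
  intro m
  induction m with
  | zero => intro t _ y x; simp
  | succ m ih =>
    intro t ht y x
    rw [List.range_succ, List.foldl_append, List.foldl_cons, List.foldl_nil]
    have hsh : pvShape n ((List.range m).foldl
        (fun t c => (List.range (c + 1)).foldl (fun t x => pvSetN t c x (c : Int)) t) t) := by
      refine foldl_shape_pvShape _ (fun t c => ?_) _ _ _ ht
      exact foldl_shape (fun t x => pvSetN t c x (c : Int))
        (fun t s => ⟨length_pvSetN .., fun y => rowlen_pvSetN ..⟩) _ t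
    rw [pvRowFill, ih t ht, hsh.1]
    by_cases hm : m < n
    · rw [hsh.2 m hm]
      split_ifs <;> first | rfl | omega
    · split_ifs <;> first | rfl | omega

-- the upper pass on a rectangular table
theorem pvUpperPass (n : ℕ) :
    ∀ (m : ℕ) (t : List (List Int)), pvShape n t →
      ∀ y x : ℕ,
        pvCell ((List.range m).foldl
            (fun t c => (List.range (c + 1)).foldl (fun t y => pvSetN t y c (c : Int)) t) t) y x =
          if x < m ∧ y ≤ x ∧ y < n ∧ x < n then (x : Int) else pvCell t y x := by
  intro m
  induction m with
  | zero => intro t _ y x; simp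
  | succ m ih =>
    intro t ht y x
    rw [List.range_succ, List.foldl_append, List.foldl_cons, List.foldl_nil]
    have hsh : pvShape n ((List.range m).foldl
        (fun t c => (List.range (c + 1)).foldl (fun t y => pvSetN t y c (c : Int)) t) t) := by
      refine foldl_shape_pvShape _ (fun t c => ?_) _ _ _ ht
      exact foldl_shape (fun t y => pvSetN t y c (c : Int))
        (fun t s => ⟨length_pvSetN .., fun y => rowlen_pvSetN ..⟩) _ t
    rw [pvColFill, ih t ht]
    by_cases hyn : y < n
    · rw [hsh.2 y hyn, hsh.1]
      split_ifs <;> first | rfl | omega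
    · rw [hsh.1]
      split_ifs <;> first | rfl | omega

-- Nat-indexed forms of A's three stages
def pvT0 (n : ℕ) : List (List Int) :=
  (List.range n).map (fun _ => (List.range n).map (fun _ => (0 : Int)))

def pvLowN (n : ℕ) (t : List (List Int)) : List (List Int) :=
  (List.range n).foldl
    (fun t c => (List.range (c + 1)).foldl (fun t x => pvSetN t c x (c : Int)) t) t

def pvUpN (n : ℕ) (t : List (List Int)) : List (List Int) :=
  (List.range n).foldl
    (fun t c => (List.range (c + 1)).foldl (fun t y => pvSetN t y c (c : Int)) t) t

-- the lower pass with its running counter, reduced to the Nat-indexed fold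
theorem pvLowStage (k : ℕ) :
    ∀ (a : ℕ) (t : List (List Int)),
      ((List.range' a k).map (Nat.cast : ℕ → Int)).foldl
          (fun (st : List (List Int) × Int) circle =>
            ((PySem.List.pyRange 0 (circle + 1) 1).foldl
                (fun t x => pvSetCell t st.2 x st.2) st.1,
             st.2 + 1))
          (t, (a : Int))
        = ((List.range' a k).foldl
            (fun t c => (List.range (c + 1)).foldl (fun t x => pvSetN t c x (c : Int)) t) t,
           ((a + k : ℕ) : Int)) := by
  induction k with
  | zero => intro a t; simp [List.range']
  | succ k ih =>
    intro a t
    rw [List.range'_succ, List.map_cons, List.foldl_cons, List.foldl_cons]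
    have h1 : ((a : Int) + 1) = ((a + 1 : ℕ) : Int) := by push_cast; ring
    have h2 : PySem.List.pyRange 0 ((a : Int) + 1) 1
        = (List.range (a + 1)).map (Nat.cast : ℕ → Int) := by
      rw [h1]; exact PySem.List.pyRange_zero_natCast (a + 1)
    have h3 : (PySem.List.pyRange 0 ((a : Int) + 1) 1).foldl
          (fun t x => pvSetCell t (a : Int) x (a : Int)) t
        = (List.range (a + 1)).foldl (fun t x => pvSetN t a x (a : Int)) t := by
      rw [h2, List.foldl_map]
      simp only [pvSetCell_natCast]
    rw [h3, h1, ih (a + 1)]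
    congr 1
    omega

-- the upper pass with its running counter, reduced to the Nat-indexed fold
theorem pvUpStage (k : ℕ) :
    ∀ (a : ℕ) (t : List (List Int)),
      ((List.range' a k).map (Nat.cast : ℕ → Int)).foldl
          (fun (st : List (List Int) × Int) circle =>
            ((PySem.List.pyRange 0 (circle + 1) 1).foldl
                (fun t y => pvSetCell t y st.2 st.2) st.1,
             st.2 + 1))
          (t, (a : Int))
        = ((List.range' a k).foldl
            (fun t c => (List.range (c + 1)).foldl (fun t y => pvSetN t y c (c : Int)) t) t,
           ((a + k : ℕ) : Int)) := by
  induction k with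
  | zero => intro a t; simp [List.range']
  | succ k ih =>
    intro a t
    rw [List.range'_succ, List.map_cons, List.foldl_cons, List.foldl_cons]
    have h1 : ((a : Int) + 1) = ((a + 1 : ℕ) : Int) := by push_cast; ring
    have h2 : PySem.List.pyRange 0 ((a : Int) + 1) 1
        = (List.range (a + 1)).map (Nat.cast : ℕ → Int) := by
      rw [h1]; exact PySem.List.pyRange_zero_natCast (a + 1)
    have h3 : (PySem.List.pyRange 0 ((a : Int) + 1) 1).foldl
          (fun t y => pvSetCell t y (a : Int) (a : Int)) t
        = (List.range (a + 1)).foldl (fun t y => pvSetN t y a (a : Int)) t := by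
      rw [h2, List.foldl_map]
      simp only [pvSetCell_natCast]
    rw [h3, h1, ih (a + 1)]
    congr 1
    omega

-- A in Nat-indexed form
theorem pvA_normal (size : Int) (u l : Bool) :
    init_table1 size u l
      = (if u then pvUpN size.toNat else id)
          ((if l then pvLowN size.toNat else id) (pvT0 size.toNat)) := by
  have hr : PySem.List.pyRange 0 size 1
      = (List.range' 0 size.toNat).map (Nat.cast : ℕ → Int) := by
    rw [← List.range_eq_range']
    exact PySem.List.pyRange_zero size
  have hT0 : (PySem.List.pyRange 0 size 1).map
        (fun _ => (PySem.List.pyRange 0 size 1).map (fun _ => (0 : Int)))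
      = pvT0 size.toNat := by
    rw [hr, ← List.range_eq_range', List.map_map, List.map_map]
    rfl
  have hlow := pvLowStage size.toNat 0
  have hup := pvUpStage size.toNat 0
  simp only [Nat.cast_zero, List.range_eq_range'] at hlow hup
  unfold init_table1
  rw [hT0, hr]
  cases l <;> cases u <;>
    simp [hlow, hup, pvLowN, pvUpN, List.range_eq_range']

-- shapes and cells of the Nat-indexed stages
theorem pvShape_pvT0 (n : ℕ) : pvShape n (pvT0 n) := by
  refine ⟨by simp [pvT0], fun y hy => ?_⟩
  simp [pvT0, List.getD_eq_getElem?_getD, List.getElem?_replicate, hy]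

theorem pvCell_pvT0 (n : ℕ) (y x : ℕ) : pvCell (pvT0 n) y x = 0 := by
  unfold pvCell pvT0
  simp only [List.map_const', List.length_range]
  simp [List.getD_eq_getElem?_getD, List.getElem?_replicate]
  split_ifs <;> simp

theorem pvShape_pvLowN (n : ℕ) (t : List (List Int)) (h : pvShape n t) :
    pvShape n (pvLowN n t) := by
  unfold pvLowN
  refine foldl_shape_pvShape _ (fun t c => ?_) _ _ _ h
  exact foldl_shape (fun t x => pvSetN t c x (c : Int))
    (fun t s => ⟨length_pvSetN .., fun y => rowlen_pvSetN ..⟩) _ t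

theorem pvShape_pvUpN (n : ℕ) (t : List (List Int)) (h : pvShape n t) :
    pvShape n (pvUpN n t) := by
  unfold pvUpN
  refine foldl_shape_pvShape _ (fun t c => ?_) _ _ _ h
  exact foldl_shape (fun t y => pvSetN t y c (c : Int))
    (fun t s => ⟨length_pvSetN .., fun y => rowlen_pvSetN ..⟩) _ t

theorem pvCell_eq_getElem (t : List (List Int)) (y x : ℕ)
    (hy : y < t.length) (hx : x < t[y].length) : pvCell t y x = t[y][x] := by
  simp [pvCell, List.getD_eq_getElem?_getD, List.getElem?_eq_getElem, hy, hx]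

-- final per-cell value of A's table
theorem pvA_cell (n : ℕ) (u l : Bool) (y x : ℕ) (hy : y < n) (hx : x < n) :
    pvCell ((if u then pvUpN n else id) ((if l then pvLowN n else id) (pvT0 n))) y x
      = (if u && decide ((y : Int) ≤ (x : Int)) then (x : Int)
         else if l && decide ((x : Int) ≤ (y : Int)) then (y : Int)
         else 0) := by
  have h0 := pvShape_pvT0 n
  have hcl : pvCell ((if l then pvLowN n else id) (pvT0 n)) y x
      = (if l && decide ((x : Int) ≤ (y : Int)) then (y : Int) else 0) := by
    cases l with
    | false => simp [pvCell_pvT0]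
    | true =>
      show pvCell (pvLowN n (pvT0 n)) y x
        = (if (true && decide ((x : Int) ≤ (y : Int)) : Bool) then (y : Int) else 0)
      unfold pvLowN
      rw [pvLowerPass n n _ h0, pvCell_pvT0]
      by_cases hxy : x ≤ y <;> simp [hxy, hy, hx]
  have hsl : pvShape n ((if l then pvLowN n else id) (pvT0 n)) := by
    cases l <;> simp [pvShape_pvLowN, h0]
  cases u with
  | false => simpa using hcl
  | true =>
    show pvCell (pvUpN n ((if l then pvLowN n else id) (pvT0 n))) y x
      = (if (true && decide ((y : Int) ≤ (x : Int)) : Bool) then (x : Int)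
         else if l && decide ((x : Int) ≤ (y : Int)) then (y : Int) else 0)
    unfold pvUpN
    rw [pvUpperPass n n _ hsl, hcl]
    by_cases hyx : y ≤ x <;> simp [hyx, hy, hx]

-- B in Nat-indexed form
theorem pvB_normal (size : Int) (u l : Bool) :
    init_table1_alt size u l
      = (List.range size.toNat).map (fun (y : ℕ) =>
          (List.range size.toNat).map (fun (x : ℕ) =>
            if u && decide ((y : Int) ≤ (x : Int)) then (x : Int)
            else if l && decide ((x : Int) ≤ (y : Int)) then (y : Int)
            else 0)) := by
  unfold init_table1_alt
  rw [PySem.List.pyRange_zero size, List.map_map]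
  congr 1
  funext y
  simp [Function.comp, List.map_map]

-- ===== VERDICT (by name: the statement is the Claim_ definition above) =====
theorem init_table1_spec : Claim_equal_init_table1 := by
  intro size u l _
  unfold Spec_init_table1
  rw [pvA_normal, pvB_normal]
  set n := size.toNat with hn
  have hshape : pvShape n ((if u then pvUpN n else id) ((if l then pvLowN n else id) (pvT0 n))) := by
    have h0 := pvShape_pvT0 n
    have h1 : pvShape n ((if l then pvLowN n else id) (pvT0 n)) := by
      cases l <;> simp [pvShape_pvLowN, h0]
    cases u <;> simp [pvShape_pvUpN, h1]
  apply List.ext_getElem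
  · simp [hshape.1]
  · intro y hy hy'
    have hyn : y < n := by simpa [hshape.1] using hy
    have hrow : ((if u then pvUpN n else id) ((if l then pvLowN n else id) (pvT0 n)))[y].length = n := by
      have := hshape.2 y hyn
      rwa [List.getD_eq_getElem?_getD, List.getElem?_eq_getElem hy, Option.getD_some] at this
    apply List.ext_getElem
    · simpa [hrow] using (by simp :
        ((List.range n).map (fun (y : ℕ) => (List.range n).map (fun (x : ℕ) =>
          if u && decide ((y : Int) ≤ (x : Int)) then (x : Int)
          else if l && decide ((x : Int) ≤ (y : Int)) then (y : Int) else 0)))[y].length = n)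
    · intro x hx hx'
      have hxn : x < n := by simpa [hrow] using hx
      rw [← pvCell_eq_getElem _ y x hy (by simpa [hrow] using hxn),
        pvA_cell n u l y x hyn hxn]
      simp [List.getElem_map, List.getElem_range]
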